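-- pv_equiv track=rewrite | github.com/MisterXYCB/Advent-of-Code | 2024/Day 11/Puzzle 1.py | getEvolvedStones
-- ===== SOURCE A (Python) =====
-- def getEvolvedStones(stones: list) -> list:
--     evolvedStones = []
--     for stone in stones:
--         if(stone == 0):
--             evolvedStones.append(1)
--         elif(len(str(stone)) % 2 == 0):
--             stoneList = list(str(stone))
--             evolvedStones.extend([int("".join(stoneList[:len(stoneList)//2])), int("".join(stoneList[len(stoneList)//2:]))])
--         else:
--             evolvedStones.append(stone * 2024)
--
--     return evolvedStones
-- ===== SOURCE B (Python) =====
-- def getEvolvedStones(stones: list) -> list: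
--     evolvedStones = []
--     for stone in stones:
--         if stone == 0:
--             evolvedStones.append(1)
--             continue
--         d, t = 0, abs(stone)
--         while t:
--             t //= 10
--             d += 1
--         if d % 2 == 0:
--             q, r = divmod(stone, 10 ** (d // 2))
--             evolvedStones.extend((q, r))
--         else:
--             evolvedStones.append(stone * 2024)
--     return evolvedStones
-- ===== Notes on version B (the rewrite author's own statement) =====
-- stated objective: alternative
-- what changed: B keeps the single pass but replaces all string work (str(), slicing, int() re-parsing) with base-10 arithmetic: a digit-count loop on the magnitude and a divmod split by a power of ten; Pre_ restricts to nonnegative stones, the puzzle's natural domain, because on a negative stone the split is unspecified (length-of-str parity vs digit-count parity are equally defensible readings, and A raises ValueError for stones in [-9, -1]).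
-- outside the precondition, e.g. on getEvolvedStones([-2024]): A returns [-4096576], B returns [-21, 76]; on getEvolvedStones([-102]): A returns [-1, 2], B returns [-206448]; on getEvolvedStones([-9, -1]): A raises ValueError, B returns [-18216, -2024]
-- crash fix: On lists containing a stone in [-9, -1] A raises ValueError (str is '-d', the first half is '-' and int('-') fails); B counts one digit, an odd count, and returns stone * 2024 there. — e.g. on getEvolvedStones([-5]): A raises ValueError, B returns [-10120]
import Mathlib
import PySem

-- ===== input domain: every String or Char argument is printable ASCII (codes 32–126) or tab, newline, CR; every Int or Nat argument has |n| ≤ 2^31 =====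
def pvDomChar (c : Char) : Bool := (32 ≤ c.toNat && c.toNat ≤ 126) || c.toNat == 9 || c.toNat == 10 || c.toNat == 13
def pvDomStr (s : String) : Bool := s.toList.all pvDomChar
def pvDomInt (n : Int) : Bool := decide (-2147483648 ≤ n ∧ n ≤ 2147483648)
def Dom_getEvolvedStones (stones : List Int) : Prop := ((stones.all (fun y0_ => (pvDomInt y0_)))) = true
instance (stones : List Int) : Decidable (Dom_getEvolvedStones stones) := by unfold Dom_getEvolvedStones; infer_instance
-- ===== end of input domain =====

-- B replaces A's string building/slicing/parsing by base-10 arithmetic (digit count of the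
-- magnitude and a divmod split); same single pass over the stones, no str()/int() round-trips.


-- ===== PORT A =====
-- literal port: str(stone) → PySem.Int.toChars, the two slices (both bounds nonnegative,
-- where Python slicing = take/drop) → take/drop, int("".join(…)) → PySem.Int.ofChars?
-- (none exactly where Python raises ValueError; the `.getD 0` default is reached only
-- outside Pre_getEvolvedStones).
def getEvolvedStones (stones : List Int) : List Int :=
  stones.foldl (fun evolvedStones stone =>
    if stone = 0 then
      evolvedStones ++ [1]
    else if (PySem.Int.toChars stone).length % 2 = 0 then
      let stoneList := PySem.Int.toChars stone
      evolvedStones ++ [(PySem.Int.ofChars? (stoneList.take (stoneList.length / 2))).getD 0,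
                        (PySem.Int.ofChars? (stoneList.drop (stoneList.length / 2))).getD 0]
    else
      evolvedStones ++ [stone * 2024]) []

-- ===== PORT B =====
-- port of Source B's `while t: t //= 10; d += 1` loop; t = abs(stone) ≥ 0, so it runs on a
-- Nat, and the fuel argument (kept ≥ t) only makes the loop a total Lean function.
def pyDigitCountLoop : Nat → Nat → Nat
  | 0, _ => 0
  | fuel + 1, t => if t = 0 then 0 else pyDigitCountLoop fuel (t / 10) + 1

def getEvolvedStones_alt (stones : List Int) : List Int :=
  stones.foldl (fun evolvedStones stone =>
    if stone = 0 then
      evolvedStones ++ [1]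
    else
      let d := pyDigitCountLoop |stone|.toNat |stone|.toNat
      if d % 2 = 0 then
        let p : Int := (10 : Int) ^ (d / 2)
        evolvedStones ++ [PySem.Int.floordiv stone p, PySem.Int.mod stone p]
      else
        evolvedStones ++ [stone * 2024]) []

-- ===== PRECONDITION & SPEC =====
-- Pre_ restricts to nonnegative stones — the function's natural domain (the puzzle's
-- stones are nonnegative numbers): on a negative stone the split is unspecified — the
-- length-of-str parity A tests and the digit-count parity B tests are equally defensible
-- readings (and A raises ValueError for stones in [-9, -1], where int('-') fails).
def Pre_getEvolvedStones (stones : List Int) : Prop :=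
  ∀ s ∈ stones, 0 ≤ s
instance (stones : List Int) : Decidable (Pre_getEvolvedStones stones) := by unfold Pre_getEvolvedStones; infer_instance
def pvWitness_getEvolvedStones : List Int := [0, 1, 12, 2024]

-- A raises ValueError (int("-")) exactly on lists containing a stone in [-9, -1]; B counts
-- one digit for such a stone, an odd count, and returns stone * 2024 for it
-- (checked by the bottom theorem getEvolvedStones_raises).
def Raises_getEvolvedStones (stones : List Int) : Prop :=
  ∃ s ∈ stones, -9 ≤ s ∧ s ≤ -1
instance (stones : List Int) : Decidable (Raises_getEvolvedStones stones) := by unfold Raises_getEvolvedStones; infer_instance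
def pvRaiseWitness_getEvolvedStones : List Int := [-5]
def pvRaiseWitnessOut_getEvolvedStones : List Int := [-10120]

def Spec_getEvolvedStones (stones : List Int) (out : List Int) : Prop := out = getEvolvedStones_alt stones
instance (stones : List Int) (out : List Int) : Decidable (Spec_getEvolvedStones stones out) := by unfold Spec_getEvolvedStones; infer_instance

-- ===== CLAIM (what is proved, stated in full; the proofs are below) =====
def Claim_equal_getEvolvedStones : Prop := ∀ (stones : List Int), Dom_getEvolvedStones stones → Pre_getEvolvedStones stones → Spec_getEvolvedStones stones (getEvolvedStones stones)
def Claim_raises_getEvolvedStones : Prop := (∀ (stones : List Int), Dom_getEvolvedStones stones → Raises_getEvolvedStones stones → ¬ Pre_getEvolvedStones stones) ∧ (Dom_getEvolvedStones (pvRaiseWitness_getEvolvedStones) ∧ Raises_getEvolvedStones (pvRaiseWitness_getEvolvedStones) ∧ getEvolvedStones_alt (pvRaiseWitness_getEvolvedStones) = pvRaiseWitnessOut_getEvolvedStones)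

-- ===== LEMMAS AND PROOFS =====

def myDigits (n : Nat) : List Char :=
  if n < 10 then [Nat.digitChar n] else myDigits (n / 10) ++ [Nat.digitChar (n % 10)]
  decreasing_by exact Nat.div_lt_self (by omega) (by omega)
def nd (n : Nat) : Nat :=
  if n < 10 then 1 else nd (n / 10) + 1
  decreasing_by exact Nat.div_lt_self (by omega) (by omega)
def chA (a : Nat) (cs : List Char) : Nat :=
  cs.foldl (fun x c => x * 10 + (c.toNat - '0'.toNat)) a

theorem toDigitsCore_eq (f : Nat) : ∀ (n : Nat) (ds : List Char), n < f →
    Nat.toDigitsCore 10 f n ds = myDigits n ++ ds := by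
  induction f with
  | zero => intro n ds h; omega
  | succ f ih =>
    intro n ds h
    rw [Nat.toDigitsCore]
    by_cases h10 : n < 10
    · have : n / 10 = 0 := Nat.div_eq_of_lt h10
      simp only [this]
      rw [myDigits, if_pos h10, Nat.mod_eq_of_lt h10]
      rfl
    · have hne : ¬ n / 10 = 0 := by
        intro hz
        have := Nat.div_add_mod n 10
        have : n % 10 < 10 := Nat.mod_lt _ (by omega)
        omega
      rw [if_neg hne, ih (n / 10) _ (by have := Nat.div_lt_self (by omega : 0 < n) (by omega : 1 < 10); omega)]
      conv_rhs => rw [myDigits]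
      rw [if_neg h10]
      simp

theorem digitChar_isDigit (k : Nat) (h : k < 10) : (Nat.digitChar k).isDigit = true := by
  interval_cases k <;> decide

theorem digitChar_val (k : Nat) (h : k < 10) : (Nat.digitChar k).toNat - 48 = k := by
  interval_cases k <;> decide

theorem nd_pos (n : Nat) : 1 ≤ nd n := by
  unfold nd; split <;> omega

theorem nd_le (k : Nat) : ∀ n, n < 10 ^ k → 1 ≤ k → nd n ≤ k := by
  induction k with
  | zero => omega
  | succ k ih =>
    intro n hn _
    rw [nd]
    split
    · omega
    · have h1 : 1 ≤ k := by
        rcases Nat.eq_zero_or_pos k with h | h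
        · subst h; simp at hn; omega
        · omega
      have : n / 10 < 10 ^ k := by
        rw [Nat.div_lt_iff_lt_mul (by omega)]
        calc n < 10 ^ (k+1) := hn
        _ = 10 ^ k * 10 := by ring
      have := ih (n / 10) this h1
      omega

theorem toDigits_eq (n : Nat) : Nat.toDigits 10 n = myDigits n := by
  show Nat.toDigitsCore 10 (n + 1) n [] = myDigits n
  rw [toDigitsCore_eq (n + 1) n [] (by omega), List.append_nil]

theorem myDigits_len (n : Nat) : (myDigits n).length = nd n := by
  induction n using myDigits.induct with
  | case1 n h => rw [myDigits, nd, if_pos h, if_pos h]; rfl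
  | case2 n h ih => rw [myDigits, nd, if_neg h, if_neg h]; simp [ih]

theorem myDigits_all_digit (n : Nat) : ∀ c ∈ myDigits n, c.isDigit = true := by
  induction n using myDigits.induct with
  | case1 n h =>
    rw [myDigits, if_pos h]
    intro c hc
    simp at hc
    subst hc
    exact digitChar_isDigit n h
  | case2 n h ih =>
    rw [myDigits, if_neg h]
    intro c hc
    rcases List.mem_append.1 hc with hc | hc
    · exact ih c hc
    · simp at hc; subst hc; exact digitChar_isDigit _ (Nat.mod_lt _ (by omega))

theorem chA_cons (a : Nat) (c : Char) (cs : List Char) :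
    chA a (c :: cs) = chA (a * 10 + (c.toNat - '0'.toNat)) cs := by
  unfold chA; rw [List.foldl_cons]

theorem chA_append (a : Nat) (xs ys : List Char) :
    chA a (xs ++ ys) = chA (chA a xs) ys := by
  unfold chA; exact List.foldl_append

theorem chA_myDigits (n : Nat) : ∀ a, chA a (myDigits n) = a * 10 ^ nd n + n := by
  induction n using myDigits.induct with
  | case1 n h =>
    intro a
    rw [myDigits, nd, if_pos h, if_pos h, chA_cons]
    show a * 10 + (n.digitChar.toNat - '0'.toNat) = a * 10 ^ 1 + n
    simp [digitChar_val n h]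
  | case2 n h ih =>
    intro a
    rw [myDigits, nd, if_neg h, if_neg h, chA_append, ih]
    show (a * 10 ^ nd (n / 10) + n / 10) * 10 + ((n % 10).digitChar.toNat - '0'.toNat)
        = a * 10 ^ (nd (n / 10) + 1) + n
    have hv : (n % 10).digitChar.toNat - '0'.toNat = n % 10 := by
      simpa using digitChar_val _ (Nat.mod_lt n (by omega))
    rw [hv, Nat.pow_succ]
    have hdm := Nat.div_add_mod n 10
    generalize (10 : Nat) ^ nd (n / 10) = P
    calc (a * P + n / 10) * 10 + n % 10 = a * (P * 10) + (10 * (n / 10) + n % 10) := by ring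
      _ = a * (P * 10) + n := by rw [hdm]

theorem chA_linear (cs : List Char) : ∀ a, chA a cs = a * 10 ^ cs.length + chA 0 cs := by
  induction cs with
  | nil => intro a; simp [chA]
  | cons c cs ih =>
    intro a
    rw [chA_cons, ih, chA_cons, ih (0 * 10 + _)]
    simp only [List.length_cons, Nat.pow_succ]
    ring

theorem char_digit_toNat (c : Char) (h : c.isDigit = true) : 48 ≤ c.toNat ∧ c.toNat ≤ 57 := by
  revert h
  simp [Char.isDigit]
  intro h1 h2
  constructor
  · simpa using UInt32.le_iff_toNat_le.mp h1
  · simpa using UInt32.le_iff_toNat_le.mp h2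

theorem chA0_lt (cs : List Char) (h : ∀ c ∈ cs, c.isDigit = true) : chA 0 cs < 10 ^ cs.length := by
  induction cs with
  | nil => simp [chA]
  | cons c cs ih =>
    rw [chA_cons, chA_linear]
    have hc : c.toNat - '0'.toNat ≤ 9 := by
      have := char_digit_toNat c (h c (by simp))
      have h0 : '0'.toNat = 48 := rfl
      omega
    have ht := ih (fun d hd => h d (by simp [hd]))
    simp only [List.length_cons, Nat.pow_succ]
    have hp : 0 * 10 + (c.toNat - '0'.toNat) <= 9 := by simpa using hc
    calc (0 * 10 + (c.toNat - '0'.toNat)) * 10 ^ cs.length + chA 0 cs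
        <= 9 * 10 ^ cs.length + chA 0 cs := by
          exact Nat.add_le_add_right (Nat.mul_le_mul_right _ hp) _
      _ < 10 * 10 ^ cs.length := by omega
      _ = 10 ^ cs.length * 10 := by ring

theorem digit_not_space (c : Char) (h : c.isDigit = true) : PySem.Int.isIntSpace c = false := by
  have ht := char_digit_toNat c h
  by_contra hs
  have hs' : PySem.Int.isIntSpace c = true := by
    cases hv : PySem.Int.isIntSpace c
    · exact absurd hv hs
    · rfl
  revert hs'
  simp [PySem.Int.isIntSpace]
  and_intros <;> (intro he; subst he; revert ht; decide)

theorem pyDigitCount_eq : ∀ fuel t, t ≤ fuel → 1 ≤ t → pyDigitCountLoop fuel t = nd t := by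
  intro fuel
  induction fuel with
  | zero => intro t h1 h2; omega
  | succ fuel ih =>
    intro t h1 h2
    show (if t = 0 then 0 else pyDigitCountLoop fuel (t / 10) + 1) = nd t
    rw [if_neg (by omega)]
    rw [nd]
    split
    · have ht0 : t / 10 = 0 := Nat.div_eq_of_lt (by omega)
      rw [ht0]
      cases fuel <;> rfl
    · have hd : 1 ≤ t / 10 := by
        rename_i hge
        have := Nat.div_add_mod t 10
        have := Nat.mod_lt t (show 0 < 10 by omega)
        omega
      have hle : t / 10 ≤ fuel := by
        have := Nat.div_lt_self (show 0 < t by omega) (show 1 < 10 by omega)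
        omega
      rw [ih (t / 10) hle hd]

theorem chA_take_drop (n k : Nat) (_hk : k ≤ nd n) :
    chA 0 ((myDigits n).take k) = n / 10 ^ (nd n - k) ∧
    chA 0 ((myDigits n).drop k) = n % 10 ^ (nd n - k) := by
  have hlen : (myDigits n).length = nd n := myDigits_len n
  have hsplit : myDigits n = (myDigits n).take k ++ (myDigits n).drop k := (List.take_append_drop _ _).symm
  have hval : chA 0 (myDigits n) = n := by simpa using chA_myDigits n 0
  have hlt : chA 0 ((myDigits n).drop k) < 10 ^ (nd n - k) := by
    have hd := chA0_lt ((myDigits n).drop k) (fun c hc => myDigits_all_digit n c (List.mem_of_mem_drop hc))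
    rwa [List.length_drop, hlen] at hd
  have heq : chA 0 ((myDigits n).take k) * 10 ^ (nd n - k) + chA 0 ((myDigits n).drop k) = n := by
    have := chA_append 0 ((myDigits n).take k) ((myDigits n).drop k)
    rw [← hsplit, hval] at this
    rw [chA_linear ((myDigits n).drop k) (chA 0 ((myDigits n).take k))] at this
    rw [List.length_drop, hlen] at this
    omega
  set P := 10 ^ (nd n - k) with hP
  have hp : 0 < P := Nat.pow_pos (by omega)
  constructor
  · conv_rhs => rw [← heq, Nat.mul_comm, Nat.mul_add_div hp, Nat.div_eq_of_lt hlt]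
    omega
  · conv_rhs => rw [← heq, Nat.mul_comm, Nat.mul_add_mod, Nat.mod_eq_of_lt hlt]

theorem digit_ne (c : Char) (h : c.isDigit = true) : c ≠ '-' ∧ c ≠ '+' := by
  have := char_digit_toNat c h
  constructor <;> (intro he; subst he; revert this; decide)
theorem dw_eq_self {p : Char → Bool} (l : List Char) (h : ∀ x ∈ l, p x = false) :
    List.dropWhile p l = l := by
  cases l with
  | nil => rfl
  | cons c cs => rw [List.dropWhile_cons_of_neg]; simp [h c (by simp)]

theorem parse_digits (cs : List Char) (hne : cs ≠ []) (hlen : cs.length ≤ 5)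
    (hd : ∀ c ∈ cs, c.isDigit = true) :
    PySem.Int.ofChars? cs = some ((chA 0 cs : Nat) : Int) := by
  rcases cs with _ | ⟨c1, _ | ⟨c2, _ | ⟨c3, _ | ⟨c4, _ | ⟨c5, _ | ⟨c6, rest⟩⟩⟩⟩⟩⟩
  · exact absurd rfl hne
  · -- length 1
    have hd1 : c1.isDigit = true := hd c1 (by simp)
    have hsp : ∀ x ∈ ([c1] : List Char), PySem.Int.isIntSpace x = false := by
      intro x hx; simp at hx; rcases hx with hx <;> (rw [hx]; simp only [digit_not_space _ hd1])
    have hsp2 : ∀ x ∈ ([c1] : List Char).reverse, PySem.Int.isIntSpace x = false := by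
      intro x hx; exact hsp x (List.mem_reverse.mp hx)
    unfold PySem.Int.ofChars?
    rw [dw_eq_self _ hsp, dw_eq_self _ hsp2, List.reverse_reverse]
    dsimp only []
    split
    · rename_i ds hmatch
      simp at hmatch
      exact absurd hmatch.1 (digit_ne c1 hd1).1
    · rename_i ds hmatch
      simp at hmatch
      exact absurd hmatch.1 (digit_ne c1 hd1).2
    · change Option.map (fun n : Int => n)
        (Option.bind (if c1.isDigit = true then some (0 * 10 + (c1.toNat - '0'.toNat)) else ?_)
          fun a => some ((a : Nat) : Int)) = some ((chA 0 [c1] : Nat) : Int)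
      rw [hd1]
      simp only [if_true]
      simp [chA]
  · -- length 2
    have hd1 : c1.isDigit = true := hd c1 (by simp)
    have hd2 : c2.isDigit = true := hd c2 (by simp)
    have hsp : ∀ x ∈ ([c1, c2] : List Char), PySem.Int.isIntSpace x = false := by
      intro x hx; simp at hx; rcases hx with hx | hx <;> (rw [hx]; simp only [digit_not_space _ hd1, digit_not_space _ hd2])
    have hsp2 : ∀ x ∈ ([c1, c2] : List Char).reverse, PySem.Int.isIntSpace x = false := by
      intro x hx; exact hsp x (List.mem_reverse.mp hx)
    unfold PySem.Int.ofChars?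
    rw [dw_eq_self _ hsp, dw_eq_self _ hsp2, List.reverse_reverse]
    dsimp only []
    split
    · rename_i ds hmatch
      simp at hmatch
      exact absurd hmatch.1 (digit_ne c1 hd1).1
    · rename_i ds hmatch
      simp at hmatch
      exact absurd hmatch.1 (digit_ne c1 hd1).2
    · change Option.map (fun n : Int => n)
        (Option.bind (if c1.isDigit = true then (if c2.isDigit = true then some ((0 * 10 + (c1.toNat - '0'.toNat)) * 10 + (c2.toNat - '0'.toNat)) else ?_) else ?_)
          fun a => some ((a : Nat) : Int)) = some ((chA 0 [c1, c2] : Nat) : Int)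
      rw [hd1, hd2]
      simp only [if_true]
      simp [chA]
  · -- length 3
    have hd1 : c1.isDigit = true := hd c1 (by simp)
    have hd2 : c2.isDigit = true := hd c2 (by simp)
    have hd3 : c3.isDigit = true := hd c3 (by simp)
    have hsp : ∀ x ∈ ([c1, c2, c3] : List Char), PySem.Int.isIntSpace x = false := by
      intro x hx; simp at hx; rcases hx with hx | hx | hx <;> (rw [hx]; simp only [digit_not_space _ hd1, digit_not_space _ hd2, digit_not_space _ hd3])
    have hsp2 : ∀ x ∈ ([c1, c2, c3] : List Char).reverse, PySem.Int.isIntSpace x = false := by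
      intro x hx; exact hsp x (List.mem_reverse.mp hx)
    unfold PySem.Int.ofChars?
    rw [dw_eq_self _ hsp, dw_eq_self _ hsp2, List.reverse_reverse]
    dsimp only []
    split
    · rename_i ds hmatch
      simp at hmatch
      exact absurd hmatch.1 (digit_ne c1 hd1).1
    · rename_i ds hmatch
      simp at hmatch
      exact absurd hmatch.1 (digit_ne c1 hd1).2
    · change Option.map (fun n : Int => n)
        (Option.bind (if c1.isDigit = true then (if c2.isDigit = true then (if c3.isDigit = true then some (((0 * 10 + (c1.toNat - '0'.toNat)) * 10 + (c2.toNat - '0'.toNat)) * 10 + (c3.toNat - '0'.toNat)) else ?_) else ?_) else ?_)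
          fun a => some ((a : Nat) : Int)) = some ((chA 0 [c1, c2, c3] : Nat) : Int)
      rw [hd1, hd2, hd3]
      simp only [if_true]
      simp [chA]
  · -- length 4
    have hd1 : c1.isDigit = true := hd c1 (by simp)
    have hd2 : c2.isDigit = true := hd c2 (by simp)
    have hd3 : c3.isDigit = true := hd c3 (by simp)
    have hd4 : c4.isDigit = true := hd c4 (by simp)
    have hsp : ∀ x ∈ ([c1, c2, c3, c4] : List Char), PySem.Int.isIntSpace x = false := by
      intro x hx; simp at hx; rcases hx with hx | hx | hx | hx <;> (rw [hx]; simp only [digit_not_space _ hd1, digit_not_space _ hd2, digit_not_space _ hd3, digit_not_space _ hd4])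
    have hsp2 : ∀ x ∈ ([c1, c2, c3, c4] : List Char).reverse, PySem.Int.isIntSpace x = false := by
      intro x hx; exact hsp x (List.mem_reverse.mp hx)
    unfold PySem.Int.ofChars?
    rw [dw_eq_self _ hsp, dw_eq_self _ hsp2, List.reverse_reverse]
    dsimp only []
    split
    · rename_i ds hmatch
      simp at hmatch
      exact absurd hmatch.1 (digit_ne c1 hd1).1
    · rename_i ds hmatch
      simp at hmatch
      exact absurd hmatch.1 (digit_ne c1 hd1).2
    · change Option.map (fun n : Int => n)
        (Option.bind (if c1.isDigit = true then (if c2.isDigit = true then (if c3.isDigit = true then (if c4.isDigit = true then some ((((0 * 10 + (c1.toNat - '0'.toNat)) * 10 + (c2.toNat - '0'.toNat)) * 10 + (c3.toNat - '0'.toNat)) * 10 + (c4.toNat - '0'.toNat)) else ?_) else ?_) else ?_) else ?_)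
          fun a => some ((a : Nat) : Int)) = some ((chA 0 [c1, c2, c3, c4] : Nat) : Int)
      rw [hd1, hd2, hd3, hd4]
      simp only [if_true]
      simp [chA]
  · -- length 5
    have hd1 : c1.isDigit = true := hd c1 (by simp)
    have hd2 : c2.isDigit = true := hd c2 (by simp)
    have hd3 : c3.isDigit = true := hd c3 (by simp)
    have hd4 : c4.isDigit = true := hd c4 (by simp)
    have hd5 : c5.isDigit = true := hd c5 (by simp)
    have hsp : ∀ x ∈ ([c1, c2, c3, c4, c5] : List Char), PySem.Int.isIntSpace x = false := by
      intro x hx; simp at hx; rcases hx with hx | hx | hx | hx | hx <;> (rw [hx]; simp only [digit_not_space _ hd1, digit_not_space _ hd2, digit_not_space _ hd3, digit_not_space _ hd4, digit_not_space _ hd5])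
    have hsp2 : ∀ x ∈ ([c1, c2, c3, c4, c5] : List Char).reverse, PySem.Int.isIntSpace x = false := by
      intro x hx; exact hsp x (List.mem_reverse.mp hx)
    unfold PySem.Int.ofChars?
    rw [dw_eq_self _ hsp, dw_eq_self _ hsp2, List.reverse_reverse]
    dsimp only []
    split
    · rename_i ds hmatch
      simp at hmatch
      exact absurd hmatch.1 (digit_ne c1 hd1).1
    · rename_i ds hmatch
      simp at hmatch
      exact absurd hmatch.1 (digit_ne c1 hd1).2
    · change Option.map (fun n : Int => n)
        (Option.bind (if c1.isDigit = true then (if c2.isDigit = true then (if c3.isDigit = true then (if c4.isDigit = true then (if c5.isDigit = true then some (((((0 * 10 + (c1.toNat - '0'.toNat)) * 10 + (c2.toNat - '0'.toNat)) * 10 + (c3.toNat - '0'.toNat)) * 10 + (c4.toNat - '0'.toNat)) * 10 + (c5.toNat - '0'.toNat)) else ?_) else ?_) else ?_) else ?_) else ?_)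
          fun a => some ((a : Nat) : Int)) = some ((chA 0 [c1, c2, c3, c4, c5] : Nat) : Int)
      rw [hd1, hd2, hd3, hd4, hd5]
      simp only [if_true]
      simp [chA]
  · simp only [List.length_cons] at hlen; omega

-- positive even-length split
theorem pos_even (n : Nat) (h1 : 1 ≤ n) (h2 : n ≤ 2147483648) (hpar : nd n % 2 = 0) :
    ((PySem.Int.ofChars? ((myDigits n).take ((myDigits n).length / 2))).getD 0 = ((n / 10 ^ (nd n / 2) : Nat) : Int)) ∧
    ((PySem.Int.ofChars? ((myDigits n).drop ((myDigits n).length / 2))).getD 0 = ((n % 10 ^ (nd n / 2) : Nat) : Int)) := by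
  have hLle : nd n ≤ 10 := nd_le 10 n (by omega) (by omega)
  have hL1 := nd_pos n
  set k := nd n / 2 with hk
  have hk2 : 2 * k = nd n := by omega
  have hlen : (myDigits n).length = nd n := myDigits_len n
  have htake_len : ((myDigits n).take k).length = k := by
    rw [List.length_take, hlen]; omega
  have hdrop_len : ((myDigits n).drop k).length = k := by
    rw [List.length_drop, hlen]; omega
  have htd := chA_take_drop n k (by omega)
  rw [show nd n - k = k from by omega] at htd
  rw [hlen, show nd n / 2 = k from rfl]
  constructor
  · rw [parse_digits _ (by intro he; rw [he] at htake_len; simp at htake_len; omega)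
        (by rw [htake_len]; omega) (fun c hc => myDigits_all_digit n c (List.mem_of_mem_take hc))]
    rw [htd.1]; rfl
  · rw [parse_digits _ (by intro he; rw [he] at hdrop_len; simp at hdrop_len; omega)
        (by rw [hdrop_len]; omega) (fun c hc => myDigits_all_digit n c (List.mem_of_mem_drop hc))]
    rw [htd.2]; rfl

theorem step_eq (stone : Int) (hdom : -2147483648 ≤ stone ∧ stone ≤ 2147483648)
    (hpre : 0 ≤ stone) (acc : List Int) :
    (if stone = 0 then
      acc ++ [1]
    else if (PySem.Int.toChars stone).length % 2 = 0 then
      let stoneList := PySem.Int.toChars stone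
      acc ++ [(PySem.Int.ofChars? (stoneList.take (stoneList.length / 2))).getD 0,
              (PySem.Int.ofChars? (stoneList.drop (stoneList.length / 2))).getD 0]
    else
      acc ++ [stone * 2024]) =
    (if stone = 0 then
      acc ++ [1]
    else
      let d := pyDigitCountLoop |stone|.toNat |stone|.toNat
      if d % 2 = 0 then
        let p : Int := (10 : Int) ^ (d / 2)
        acc ++ [PySem.Int.floordiv stone p, PySem.Int.mod stone p]
      else
        acc ++ [stone * 2024]) := by
  by_cases h0 : stone = 0
  · rw [if_pos h0, if_pos h0]
  · rw [if_neg h0, if_neg h0]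
    dsimp only []
    have hgt : 0 < stone := by omega
    set n := stone.toNat with hn
    have hn1 : 1 ≤ n := by omega
    have hst : stone = (n : Int) := by omega
    have habs : |stone| = (n : Int) := by rw [abs_of_nonneg (by omega)]; omega
    have htc : PySem.Int.toChars stone = myDigits n := by
      unfold PySem.Int.toChars
      rw [if_neg (by omega), toDigits_eq]
    have hcount : pyDigitCountLoop n n = nd n := pyDigitCount_eq n n (Nat.le_refl n) (by omega)
    rw [htc, habs]
    rw [show ((n : Int)).toNat = n from Int.toNat_natCast n]
    rw [hcount, myDigits_len]
    by_cases hpar : nd n % 2 = 0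
    · rw [if_pos hpar, if_pos hpar]
      have hpe := pos_even n hn1 (by omega) hpar
      rw [myDigits_len] at hpe
      rw [hpe.1, hpe.2]
      rw [show ((10:Int) ^ (nd n / 2)) = ((10 ^ (nd n / 2) : Nat) : Int) by push_cast; rfl]
      rw [hst, PySem.Int.floordiv_natCast, PySem.Int.mod_natCast]
    · rw [if_neg hpar, if_neg hpar]

theorem fold_eq (stones : List Int) : ∀ acc : List Int,
    (∀ s ∈ stones, -2147483648 ≤ s ∧ s ≤ 2147483648) →
    (∀ s ∈ stones, 0 ≤ s) →
    stones.foldl (fun evolvedStones stone =>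
      if stone = 0 then
        evolvedStones ++ [1]
      else if (PySem.Int.toChars stone).length % 2 = 0 then
        let stoneList := PySem.Int.toChars stone
        evolvedStones ++ [(PySem.Int.ofChars? (stoneList.take (stoneList.length / 2))).getD 0,
                          (PySem.Int.ofChars? (stoneList.drop (stoneList.length / 2))).getD 0]
      else
        evolvedStones ++ [stone * 2024]) acc =
    stones.foldl (fun evolvedStones stone =>
      if stone = 0 then
        evolvedStones ++ [1]
      else
        let d := pyDigitCountLoop |stone|.toNat |stone|.toNat
        if d % 2 = 0 then
          let p : Int := (10 : Int) ^ (d / 2)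
          evolvedStones ++ [PySem.Int.floordiv stone p, PySem.Int.mod stone p]
        else
          evolvedStones ++ [stone * 2024]) acc := by
  induction stones with
  | nil => intro acc _ _; rfl
  | cons s rest ih =>
    intro acc hdom hpre
    rw [List.foldl_cons, List.foldl_cons, step_eq s (hdom s (by simp)) (hpre s (by simp)) acc]
    exact ih _ (fun x hx => hdom x (by simp [hx])) (fun x hx => hpre x (by simp [hx]))

-- ===== VERDICT (by name: the statement is the Claim_ definition above) =====
theorem getEvolvedStones_spec : Claim_equal_getEvolvedStones := by
  intro stones hdom hpre
  unfold Spec_getEvolvedStones getEvolvedStones getEvolvedStones_alt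
  apply fold_eq
  · intro s hs
    have := (List.all_eq_true.mp hdom) s hs
    simpa [pvDomInt] using this
  · exact hpre

theorem getEvolvedStones_raises : Claim_raises_getEvolvedStones := by
  unfold Claim_raises_getEvolvedStones
  refine ⟨?_, by decide⟩
  intro stones _ ⟨s, hs, h1, h2⟩ hpre
  have := hpre s hs
  omega

-- self-check: B's port really returns the stated literal at the raise witness
theorem pvRaiseWitness_getEvolvedStones_ok :
    getEvolvedStones_alt pvRaiseWitness_getEvolvedStones = pvRaiseWitnessOut_getEvolvedStones :=
  getEvolvedStones_raises.2.2.2
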